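-- pv_equiv track=rewrite | github.com/timewinder-dev/timewinder-prototype | tests/temporal_fuzz/test_temporal_basics.py | eventuallyAlways_bool
-- ===== SOURCE A (Python) =====
-- from typing import List
--
-- TTrace = List[bool]
--
-- def always_bool(l: TTrace) -> bool:
--     return all(l)
--
-- def eventuallyAlways_bool(l: TTrace) -> bool:
--     if len(l) == 0:
--         return True
--     if len(l) == 1:
--         return l[0]
--     if l[0] is True:
--         return always_bool(l[1:]) or eventuallyAlways_bool(l[1:])
--     else:
--         return eventuallyAlways_bool(l[1:])
-- ===== SOURCE B (Python) =====
-- def eventuallyAlways_bool(l):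
--     return l[-1] if l else True
-- ===== Notes on version B (the rewrite author's own statement) =====
-- stated objective: faster
-- what changed: The O(n^2) recursion (each step rescans the suffix with all()) is replaced by the closed form: eventually-always over a finite trace is just the last element (True for an empty trace).
import Mathlib
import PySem

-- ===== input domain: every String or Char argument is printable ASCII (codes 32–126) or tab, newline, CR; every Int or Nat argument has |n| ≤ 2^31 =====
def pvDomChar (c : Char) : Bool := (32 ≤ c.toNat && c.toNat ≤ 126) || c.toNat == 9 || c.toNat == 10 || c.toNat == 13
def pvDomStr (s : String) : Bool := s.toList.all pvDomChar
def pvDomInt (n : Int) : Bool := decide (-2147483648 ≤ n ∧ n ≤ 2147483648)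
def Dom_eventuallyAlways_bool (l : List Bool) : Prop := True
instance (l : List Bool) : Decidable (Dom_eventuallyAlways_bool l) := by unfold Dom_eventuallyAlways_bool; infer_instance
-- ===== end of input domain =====

-- B replaces A's O(n^2) suffix recursion by the closed form "last element, True if empty".

-- ===== PORT A =====
-- all(l)
def always_bool (l : List Bool) : Bool := l.all id

def eventuallyAlways_bool : List Bool → Bool
  | [] => true
  | [x] => x
  | x :: rest =>
      if x = true then always_bool rest || eventuallyAlways_bool rest
      else eventuallyAlways_bool rest

-- ===== PORT B =====
-- l[-1] if l else True
def eventuallyAlways_bool_alt (l : List Bool) : Bool :=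
  if l.isEmpty then true else (PySem.List.pyGet? l (-1)).getD true

-- ===== PRECONDITION & SPEC =====
def Spec_eventuallyAlways_bool (l : List Bool) (out : Bool) : Prop := out = eventuallyAlways_bool_alt l
instance (l : List Bool) (out : Bool) : Decidable (Spec_eventuallyAlways_bool l out) := by unfold Spec_eventuallyAlways_bool; infer_instance

-- ===== CLAIM (what is proved, stated in full; the proofs are below) =====
def Claim_equal_eventuallyAlways_bool : Prop := ∀ (l : List Bool), Dom_eventuallyAlways_bool l → Spec_eventuallyAlways_bool l (eventuallyAlways_bool l)

-- ===== LEMMAS AND PROOFS =====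

-- B computes last-or-true
theorem alt_eq_getLastD (l : List Bool) : eventuallyAlways_bool_alt l = l.getLastD true := by
  cases l with
  | nil => rfl
  | cons x xs =>
    simp [eventuallyAlways_bool_alt, PySem.List.pyGet?, PySem.List.pyIdx?,
      List.getLast?_eq_getElem?]

theorem always_imp_last (l : List Bool) (h : always_bool l = true) : l.getLastD true = true := by
  cases l with
  | nil => rfl
  | cons x xs =>
    simp only [always_bool, List.all_eq_true, id] at h
    rw [List.getLastD_eq_getLast?, List.getLast?_eq_some_getLast (l := x :: xs) (by simp)]
    exact h _ (List.getLast_mem _)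

theorem a_eq_getLastD (l : List Bool) : eventuallyAlways_bool l = l.getLastD true := by
  induction l with
  | nil => rfl
  | cons x xs ih =>
    cases xs with
    | nil => simp [eventuallyAlways_bool]
    | cons y ys =>
      by_cases hx : x = true
      · simp only [eventuallyAlways_bool, if_pos hx, ih]
        by_cases hab : always_bool (y :: ys) = true
        · have := always_imp_last _ hab
          rw [List.getLastD_eq_getLast?] at this
          simp [hab, this]
        · simp [Bool.eq_false_iff.mpr hab]
      · simp only [eventuallyAlways_bool, if_neg hx, ih]
        simp

-- ===== VERDICT (by name: the statement is the Claim_ definition above) =====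
theorem eventuallyAlways_bool_spec : Claim_equal_eventuallyAlways_bool := by
  intro l _
  unfold Spec_eventuallyAlways_bool
  rw [a_eq_getLastD, alt_eq_getLastD]
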